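-- pv_equiv track=rewrite | github.com/pypi-data/pypi-mirror-376 | packages/imgshape/imgshape-2.1.4-py3-none-any.whl/imgshape/viz.py | _extract_dims
-- ===== SOURCE A (Python) =====
-- from typing import List, Dict, Tuple, Optional
--
-- def _extract_dims(shapes_dict: Dict[str, Tuple[int, int, int]]) -> Tuple[List[int], List[int], List[int]]:
--     """Extract width, height, channels from a dict of {path: (h,w,c)}."""
--     widths, heights, channels = [], [], []
--     for shape in shapes_dict.values():
--         if len(shape) == 3:
--             h, w, c = shape
--             widths.append(w)
--             heights.append(h)
--             channels.append(c)
--     return widths, heights, channels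
-- ===== SOURCE B (Python) =====
-- def _extract_dims(shapes_dict):
--     """Extract width, height, channels from a dict of {path: (h,w,c)}."""
--     def go(vals, lo, hi):
--         # divide and conquer over the index range [lo, hi)
--         if hi <= lo:
--             return [], [], []
--         if hi - lo == 1:
--             s = vals[lo]
--             if len(s) == 3:
--                 h, w, c = s
--                 return [w], [h], [c]
--             return [], [], []
--         mid = (lo + hi) // 2
--         lw, lh, lc = go(vals, lo, mid)
--         rw, rh, rc = go(vals, mid, hi)
--         return lw + rw, lh + rh, lc + rc
--     vals = list(shapes_dict.values())
--     return go(vals, 0, len(vals))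
-- ===== Notes on version B (the rewrite author's own statement) =====
-- stated objective: alternative
-- what changed: B is a divide-and-conquer recursion: it splits the value list's index range in halves, solves each half, and concatenates the three projected lists, instead of A's single iterative loop with three interleaved appends.
import Mathlib
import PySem

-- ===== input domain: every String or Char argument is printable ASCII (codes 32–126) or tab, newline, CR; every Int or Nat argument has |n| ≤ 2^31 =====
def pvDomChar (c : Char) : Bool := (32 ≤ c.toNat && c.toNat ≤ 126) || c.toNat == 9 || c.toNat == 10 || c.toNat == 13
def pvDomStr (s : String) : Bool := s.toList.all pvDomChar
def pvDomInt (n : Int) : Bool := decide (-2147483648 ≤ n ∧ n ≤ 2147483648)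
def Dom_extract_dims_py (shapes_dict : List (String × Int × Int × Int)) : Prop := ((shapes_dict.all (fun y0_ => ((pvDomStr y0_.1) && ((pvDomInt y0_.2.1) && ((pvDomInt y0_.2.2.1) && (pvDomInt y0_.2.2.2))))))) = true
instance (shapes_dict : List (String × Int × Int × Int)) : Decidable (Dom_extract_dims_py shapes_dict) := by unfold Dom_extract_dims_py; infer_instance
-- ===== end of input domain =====

-- ===== PORT A =====
-- B replaces A's single append loop by a divide-and-conquer recursion over the value list (objective: alternative).
-- Port of A: loop over the dict values, appending w/h/c to three accumulators.
-- (the `len(shape) == 3` test is always true for the typed triples of this signature)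
def extract_dims_py (shapes_dict : List (String × Int × Int × Int)) : List Int × List Int × List Int :=
  shapes_dict.foldl
    (fun acc kv =>
      let h := kv.2.1; let w := kv.2.2.1; let c := kv.2.2.2
      (acc.1 ++ [w], acc.2.1 ++ [h], acc.2.2 ++ [c]))
    ([], [], [])

-- ===== PORT B =====
-- Port of B's helper `go`: divide-and-conquer over the index range [lo, hi) of vals.
-- (as in port A, the `len(s) == 3` test is always true for typed triples)
def extractDimsGo (vals : List (Int × Int × Int)) (lo hi : Nat) : List Int × List Int × List Int :=
  if hi ≤ lo then ([], [], [])
  else if hi - lo = 1 then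
    match vals[lo]? with
    | some s => ([s.2.1], [s.1], [s.2.2])
    | none => ([], [], [])
  else
    let mid := (lo + hi) / 2
    let l := extractDimsGo vals lo mid
    let r := extractDimsGo vals mid hi
    (l.1 ++ r.1, l.2.1 ++ r.2.1, l.2.2 ++ r.2.2)
termination_by hi - lo
decreasing_by all_goals omega

def extract_dims_py_alt (shapes_dict : List (String × Int × Int × Int)) : List Int × List Int × List Int :=
  let vals := shapes_dict.map (·.2)
  extractDimsGo vals 0 vals.length

-- ===== PRECONDITION & SPEC =====
def Spec_extract_dims_py (shapes_dict : List (String × Int × Int × Int)) (out : List Int × List Int × List Int) : Prop := out = extract_dims_py_alt shapes_dict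
instance (shapes_dict : List (String × Int × Int × Int)) (out : List Int × List Int × List Int) : Decidable (Spec_extract_dims_py shapes_dict out) := by unfold Spec_extract_dims_py; infer_instance

-- ===== CLAIM (what is proved, stated in full; the proofs are below) =====
def Claim_equal_extract_dims_py : Prop := ∀ (shapes_dict : List (String × Int × Int × Int)), Dom_extract_dims_py shapes_dict → Spec_extract_dims_py shapes_dict (extract_dims_py shapes_dict)

-- ===== LEMMAS AND PROOFS =====
-- A's fold with arbitrary accumulator appends the three projection maps.
theorem extract_dims_foldl (l : List (String × Int × Int × Int))
    (ws hs cs : List Int) :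
    l.foldl
      (fun acc kv =>
        let h := kv.2.1; let w := kv.2.2.1; let c := kv.2.2.2
        ((acc.1 ++ [w] : List Int), (acc.2.1 ++ [h] : List Int), (acc.2.2 ++ [c] : List Int)))
      (ws, hs, cs)
    = (ws ++ l.map (·.2.2.1), hs ++ l.map (·.2.1), cs ++ l.map (·.2.2.2)) := by
  induction l generalizing ws hs cs with
  | nil => simp
  | cons a l ih => simp [List.foldl, ih]

-- B's divide-and-conquer computes the three projection maps of the segment [lo, hi).
theorem extractDimsGo_eq (vals : List (Int × Int × Int)) (lo hi : Nat)
    (hle : lo ≤ hi) (hhi : hi ≤ vals.length) :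
    extractDimsGo vals lo hi =
      (((vals.drop lo).take (hi - lo)).map (·.2.1),
       ((vals.drop lo).take (hi - lo)).map (·.1),
       ((vals.drop lo).take (hi - lo)).map (·.2.2)) := by
  rw [extractDimsGo]
  split
  · have : hi - lo = 0 := by omega
    simp [this]
  · split
    · rename_i h1 h2
      have hlt : lo < vals.length := by omega
      have hget : vals[lo]? = some vals[lo] := List.getElem?_eq_getElem hlt
      have hseg : (vals.drop lo).take (hi - lo) = [vals[lo]] := by
        rw [h2, List.take_one, List.head?_eq_getElem?, List.getElem?_drop]
        simp [List.getElem?_eq_getElem hlt]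
      rw [hget, hseg]; simp
    · rename_i h1 h2
      have hm1 : lo ≤ (lo + hi) / 2 := by omega
      have hm2 : (lo + hi) / 2 ≤ hi := by omega
      have hsplit : (vals.drop lo).take (hi - lo)
          = (vals.drop lo).take ((lo + hi) / 2 - lo)
            ++ (vals.drop ((lo + hi) / 2)).take (hi - (lo + hi) / 2) := by
        have h3 : hi - lo = ((lo + hi) / 2 - lo) + (hi - (lo + hi) / 2) := by omega
        rw [h3, List.take_add, List.drop_drop]
        congr 3
        omega
      simp only [extractDimsGo_eq vals lo ((lo + hi) / 2) hm1 (by omega),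
        extractDimsGo_eq vals ((lo + hi) / 2) hi hm2 hhi, hsplit, List.map_append]
termination_by hi - lo
decreasing_by all_goals omega

-- ===== VERDICT (by name: the statement is the Claim_ definition above) =====
theorem extract_dims_py_spec : Claim_equal_extract_dims_py := by
  intro sd _
  unfold Spec_extract_dims_py extract_dims_py extract_dims_py_alt
  rw [extract_dims_foldl, extractDimsGo_eq _ _ _ (Nat.zero_le _) (le_refl _)]
  simp [List.map_take, List.map_map, Function.comp_def]
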